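-- pv_equiv track=rewrite | github.com/Pandiyan5273/DSA | Difficulty: Basic/Reverse a string with spaces intact/reverse-a-string-with-spaces-intact.py | reverseWithSpacesIntact
-- ===== SOURCE A (Python) =====
-- def reverseWithSpacesIntact(s):
--     n=len(s)
--     s=list(s)
--     l=0
--     r=n-1
--     while(l<r):
--         if s[l]==" ":
--             l+=1
--         elif s[r]==" ":
--             r-=1
--         else:
--             s[l],s[r]=s[r],s[l]
--             l+=1
--             r-=1
--     return "".join(s)
-- ===== SOURCE B (Python) =====
-- def reverseWithSpacesIntact(s):
--     chars = [c for c in s if c != ' ']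
--     chars.reverse()
--     out = []
--     i = 0
--     for c in s:
--         if c == ' ':
--             out.append(' ')
--         else:
--             out.append(chars[i])
--             i += 1
--     return ''.join(out)
-- ===== Notes on version B (the rewrite author's own statement) =====
-- stated objective: simpler
-- what changed: Replaces the converging two-pointer in-place swap loop with two independent linear passes: collect the non-space characters, reverse that list, then rebuild the string keeping spaces in place and drawing the other positions from the reversed list.
import Mathlib
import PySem

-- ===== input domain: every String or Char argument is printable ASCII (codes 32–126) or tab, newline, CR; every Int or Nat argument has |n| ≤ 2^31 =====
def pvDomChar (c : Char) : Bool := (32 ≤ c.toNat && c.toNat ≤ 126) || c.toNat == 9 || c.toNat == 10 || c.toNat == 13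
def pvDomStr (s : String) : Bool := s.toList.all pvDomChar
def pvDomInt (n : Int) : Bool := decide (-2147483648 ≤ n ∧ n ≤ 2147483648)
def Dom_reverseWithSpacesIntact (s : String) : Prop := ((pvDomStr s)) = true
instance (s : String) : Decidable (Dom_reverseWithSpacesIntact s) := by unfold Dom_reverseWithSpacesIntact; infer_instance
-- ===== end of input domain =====

-- ===== PORT A =====
-- B reorganizes A's in-place converging two-pointer swap into two independent linear
-- passes (filter+reverse, then rebuild); same cost, simpler structure.

-- the while(l<r) loop of A: swap the non-space chars at l and r, skipping spaces
def loopA (s : List Char) (l r : Nat) : List Char :=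
  if _h : l < r then
    -- indices l, r are always in range here, so getD is exact for Python's s[l], s[r]
    if s.getD l ' ' = ' ' then loopA s (l+1) r
    else if s.getD r ' ' = ' ' then loopA s l (r-1)
    else loopA ((s.set l (s.getD r ' ')).set r (s.getD l ' ')) (l+1) (r-1)
  else s
termination_by r - l
decreasing_by all_goals omega

def reverseWithSpacesIntact (s : String) : String :=
  String.mk (loopA s.toList 0 (s.toList.length - 1))

-- ===== PORT B =====
-- rebuild pass: spaces stay, other positions consume the reversed non-space list
-- (consuming the list head mirrors Source B's advancing index i into chars)
def fillB (s cs : List Char) : List Char :=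
  match s, cs with
  | [], _ => []
  | c :: t, cs =>
    if c = ' ' then ' ' :: fillB t cs
    else match cs with
      | [] => []            -- unreachable: cs holds exactly the non-space chars of s
      | d :: ds => d :: fillB t ds

def reverseWithSpacesIntact_alt (s : String) : String :=
  String.mk (fillB s.toList ((s.toList.filter (fun c => c ≠ ' ')).reverse))

-- ===== PRECONDITION & SPEC =====
def Spec_reverseWithSpacesIntact (s : String) (out : String) : Prop := out = reverseWithSpacesIntact_alt s
instance (s : String) (out : String) : Decidable (Spec_reverseWithSpacesIntact s out) := by unfold Spec_reverseWithSpacesIntact; infer_instance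

-- ===== CLAIM (what is proved, stated in full; the proofs are below) =====
def Claim_equal_reverseWithSpacesIntact : Prop := ∀ (s : String), Dom_reverseWithSpacesIntact s → Spec_reverseWithSpacesIntact s (reverseWithSpacesIntact s)

-- ===== LEMMAS AND PROOFS =====

-- the value B computes on a segment: non-space chars reversed in place
def revNS (m : List Char) : List Char := fillB m ((m.filter (fun c => c ≠ ' ')).reverse)

theorem fillB_space_snoc (xs : List Char) (cs : List Char)
    (hlen : cs.length = (xs.filter (fun c => c ≠ ' ')).length) :
    fillB (xs ++ [' ']) cs = fillB xs cs ++ [' '] := by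
  induction xs generalizing cs with
  | nil => simp [fillB]
  | cons c t ih =>
    by_cases hc : c = ' '
    · rw [List.filter_cons_of_neg (by simp [hc])] at hlen
      simp [fillB, hc, ih cs hlen]
    · rw [List.filter_cons_of_pos (by simp [hc])] at hlen
      cases cs with
      | nil => simp at hlen
      | cons d ds =>
        simp only [List.length_cons, Nat.add_right_cancel_iff] at hlen
        simp [fillB, hc, ih ds hlen]

theorem revNS_nil : revNS [] = [] := rfl

theorem revNS_single (c : Char) : revNS [c] = [c] := by
  by_cases hc : c = ' ' <;> simp [revNS, fillB, hc]

theorem revNS_space_cons (m : List Char) : revNS (' ' :: m) = ' ' :: revNS m := by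
  simp [revNS, fillB]

theorem revNS_space_snoc (m : List Char) : revNS (m ++ [' ']) = revNS m ++ [' '] := by
  unfold revNS
  rw [show (m ++ [' ']).filter (fun c => c ≠ ' ') = m.filter (fun c => c ≠ ' ') by simp]
  exact fillB_space_snoc m _ (by simp)

theorem fillB_snoc (xs : List Char) (cs : List Char) (c d : Char) (hd : d ≠ ' ')
    (hlen : cs.length = (xs.filter (fun c => c ≠ ' ')).length) :
    fillB (xs ++ [d]) (cs ++ [c]) = fillB xs cs ++ [c] := by
  induction xs generalizing cs with
  | nil =>
    have : cs = [] := List.eq_nil_of_length_eq_zero (by simpa using hlen)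
    subst this; simp [fillB, hd]
  | cons x t ih =>
    by_cases hx : x = ' '
    · rw [List.filter_cons_of_neg (by simp [hx])] at hlen
      simp [fillB, hx, ih cs hlen]
    · rw [List.filter_cons_of_pos (by simp [hx])] at hlen
      cases cs with
      | nil => simp at hlen
      | cons e es =>
        simp only [List.length_cons, Nat.add_right_cancel_iff] at hlen
        simp [fillB, hx, ih es hlen]

theorem revNS_swap (m : List Char) (c d : Char) (hc : c ≠ ' ') (hd : d ≠ ' ') :
    revNS (c :: (m ++ [d])) = d :: revNS m ++ [c] := by
  unfold revNS
  rw [show (c :: (m ++ [d])).filter (fun x => x ≠ ' ') =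
      c :: (m.filter (fun x => x ≠ ' ')) ++ [d] by simp [hc, hd]]
  simp only [List.reverse_append, List.reverse_cons, List.reverse_nil, List.nil_append,
    List.cons_append]
  show fillB (c :: (m ++ [d])) (d :: ((m.filter (fun x => x ≠ ' ')).reverse ++ [c])) = _
  simp only [fillB, if_neg hc]
  rw [fillB_snoc m _ c d hd (by simp)]

theorem getD_at (pre : List Char) (x : Char) (rest : List Char) :
    (pre ++ x :: rest).getD pre.length ' ' = x := by
  simp

theorem set_at (pre : List Char) (x y : Char) (rest : List Char) :
    (pre ++ x :: rest).set pre.length y = pre ++ y :: rest := by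
  induction pre with
  | nil => rfl
  | cons a p ih => simp [List.set, ih]

theorem loopA_eq (n : Nat) (m pre suf : List Char) (hn : m.length ≤ n) :
    loopA (pre ++ m ++ suf) pre.length (pre.length + m.length - 1) =
      pre ++ revNS m ++ suf := by
  induction n generalizing m pre suf with
  | zero =>
    have : m = [] := List.eq_nil_of_length_eq_zero (Nat.le_zero.mp hn)
    subst this
    rw [loopA, dif_neg (by omega)]
    simp [revNS_nil]
  | succ n ih =>
    cases m with
    | nil => rw [loopA, dif_neg (by simp)]; simp [revNS_nil]
    | cons c t =>
      rcases t.eq_nil_or_concat with rfl | ⟨m', d, h⟩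
      · rw [loopA, dif_neg (by simp)]
        simp [revNS_single]
      · rw [List.concat_eq_append] at h
        subst h
        have hlen2 : m'.length + 2 ≤ n + 1 := by
          have := hn; simp at this; omega
        rw [loopA]
        rw [show pre.length + (c :: (m' ++ [d])).length - 1 = pre.length + m'.length + 1 by
          simp; omega]
        rw [dif_pos (by omega)]
        have hsl : (pre ++ (c :: (m' ++ [d])) ++ suf).getD pre.length ' ' = c := by
          have h := getD_at pre c (m' ++ [d] ++ suf); simpa using h
        have hsr : (pre ++ (c :: (m' ++ [d])) ++ suf).getD (pre.length + m'.length + 1) ' ' = d := by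
          have h := getD_at (pre ++ c :: m') d suf
          rw [show (pre ++ c :: m').length = pre.length + m'.length + 1 by simp; omega] at h
          simpa using h
        rw [hsl, hsr]
        by_cases hc : c = ' '
        · rw [if_pos hc]
          subst hc
          have key := ih (m' ++ [d]) (pre ++ [' ']) suf (by simp; omega)
          rw [show pre ++ (' ' :: (m' ++ [d])) ++ suf = (pre ++ [' ']) ++ (m' ++ [d]) ++ suf by simp]
          rw [show pre.length + m'.length + 1 = (pre ++ [' ']).length + (m' ++ [d]).length - 1 by
            simp; omega]
          rw [show pre.length + 1 = (pre ++ [' ']).length by simp]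
          rw [show pre ++ revNS (' ' :: (m' ++ [d])) ++ suf
              = (pre ++ [' ']) ++ revNS (m' ++ [d]) ++ suf by rw [revNS_space_cons]; simp]
          exact key
        · rw [if_neg hc]
          by_cases hd : d = ' '
          · rw [if_pos hd]
            subst hd
            have key := ih (c :: m') pre (' ' :: suf) (by simp; omega)
            rw [show pre ++ (c :: (m' ++ [' '])) ++ suf = pre ++ (c :: m') ++ (' ' :: suf) by simp]
            rw [show pre.length + m'.length + 1 - 1 = pre.length + (c :: m').length - 1 by
              simp]
            rw [show pre ++ revNS (c :: (m' ++ [' '])) ++ suf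
                = pre ++ revNS (c :: m') ++ (' ' :: suf) by
              rw [show (c :: (m' ++ [' '])) = (c :: m') ++ [' '] by simp, revNS_space_snoc]
              simp]
            exact key
          · rw [if_neg hd]
            rw [show (pre ++ (c :: (m' ++ [d])) ++ suf).set pre.length d
                = pre ++ (d :: (m' ++ [d])) ++ suf by
              rw [show pre ++ (c :: (m' ++ [d])) ++ suf = pre ++ c :: (m' ++ [d] ++ suf) by simp,
                set_at]
              simp]
            rw [show (pre ++ (d :: (m' ++ [d])) ++ suf).set (pre.length + m'.length + 1) c
                = pre ++ (d :: (m' ++ [c])) ++ suf by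
              rw [show pre ++ (d :: (m' ++ [d])) ++ suf = (pre ++ d :: m') ++ d :: suf by simp,
                show pre.length + m'.length + 1 = (pre ++ d :: m').length by simp; omega,
                set_at]
              simp]
            have key := ih m' (pre ++ [d]) (c :: suf) (by omega)
            rw [show pre ++ (d :: (m' ++ [c])) ++ suf = (pre ++ [d]) ++ m' ++ (c :: suf) by simp]
            rw [show pre.length + m'.length + 1 - 1 = (pre ++ [d]).length + m'.length - 1 by simp]
            rw [show pre.length + 1 = (pre ++ [d]).length by simp]
            rw [show pre ++ revNS (c :: (m' ++ [d])) ++ suf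
                = (pre ++ [d]) ++ revNS m' ++ (c :: suf) by rw [revNS_swap m' c d hc hd]; simp]
            exact key

-- ===== VERDICT (by name: the statement is the Claim_ definition above) =====
theorem reverseWithSpacesIntact_spec : Claim_equal_reverseWithSpacesIntact := by
  intro s _
  show reverseWithSpacesIntact s = reverseWithSpacesIntact_alt s
  unfold reverseWithSpacesIntact reverseWithSpacesIntact_alt
  apply congrArg
  have h := loopA_eq (s.toList.length) (s.toList) [] [] (le_refl _)
  simpa [revNS] using h
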